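-- pv_equiv track=rewrite | github.com/rhythmcao/text2sql-graph2tree | preprocess/process_utils.py | search_for_longest_substring
-- ===== SOURCE A (Python) =====
-- def search_for_longest_substring(question, val, ignore_chars=''):
--     # record longest "substring" in question: start and end position
--     # "substring" means chars in the question follow the ASC order in val, but not necessarily adjacent in val
--     start, end, val_ptr, candidates = 0, 0, 0, []
--     while end < len(question):
--         if question[end] not in val[val_ptr:] and question[end] not in ignore_chars:
--             if end > start:
--                 candidates.append((start, end))
--             val_ptr = 0
--             if question[end] in val:
--                 start, end = end, end - 1
--             else: start = end + 1
--         elif question[end] in ignore_chars: pass # for longest match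
--         else: # move the pointer in val
--             val_ptr = val.index(question[end], val_ptr)
--         end += 1
--     if end > start:
--         candidates.append((start, end))
--     if len(candidates) == 0: return (0, 0)
--     # remove prefix and suffix stopwords for longest useful match
--     best_match = [0, (0, 0)]
--     for s, e in candidates:
--         span = question[s:e]
--         e -= len(span) - len(span.rstrip(ignore_chars))
--         s += len(span) - len(span.lstrip(ignore_chars))
--         if e - s > best_match[0]:
--             best_match = [e - s, (s, e)]
--     return best_match[1]
-- ===== SOURCE B (Python) =====
-- def search_for_longest_substring(question, val, ignore_chars=''):
--     # B: subsequence automaton over val + staged segmentation / trim / max() selection.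
--     n, m = len(question), len(val)
--     # nxt[j][c] = smallest k >= j with val[k] == c
--     nxt = [dict() for _ in range(m + 1)]
--     for j in range(m - 1, -1, -1):
--         nxt[j] = dict(nxt[j + 1])
--         nxt[j][val[j]] = j
--     ig = frozenset(ignore_chars)
--
--     def segments():
--         # maximal greedy runs of question, via the automaton
--         s = 0
--         while s < n:
--             e, j = s, 0
--             while e < n:
--                 c = question[e]
--                 if c in ig:
--                     e += 1
--                 elif c in nxt[j]:
--                     j, e = nxt[j][c], e + 1
--                 else:
--                     break
--             if e > s:
--                 yield s, e
--             s = max(e, s + 1)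
--
--     def trimmed(s, e):
--         while e > s and question[e - 1] in ig:
--             e -= 1
--         while s < e and question[s] in ig:
--             s += 1
--         return s, e
--
--     best = max((trimmed(s, e) for s, e in segments()),
--                key=lambda p: p[1] - p[0], default=(0, 0))
--     return best if best[1] > best[0] else (0, 0)
-- ===== Notes on version B (the rewrite author's own statement) =====
-- stated objective: alternative
-- what changed: B precomputes a subsequence automaton over val (per-position next-occurrence dicts) and segments question with it in staged passes (a segments generator, a trim helper, final selection by max(key=...)) instead of A's single stateful while-loop with slice-membership tests and val.index scans, an explicit candidate list and a second best-tracking pass.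
import Mathlib
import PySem

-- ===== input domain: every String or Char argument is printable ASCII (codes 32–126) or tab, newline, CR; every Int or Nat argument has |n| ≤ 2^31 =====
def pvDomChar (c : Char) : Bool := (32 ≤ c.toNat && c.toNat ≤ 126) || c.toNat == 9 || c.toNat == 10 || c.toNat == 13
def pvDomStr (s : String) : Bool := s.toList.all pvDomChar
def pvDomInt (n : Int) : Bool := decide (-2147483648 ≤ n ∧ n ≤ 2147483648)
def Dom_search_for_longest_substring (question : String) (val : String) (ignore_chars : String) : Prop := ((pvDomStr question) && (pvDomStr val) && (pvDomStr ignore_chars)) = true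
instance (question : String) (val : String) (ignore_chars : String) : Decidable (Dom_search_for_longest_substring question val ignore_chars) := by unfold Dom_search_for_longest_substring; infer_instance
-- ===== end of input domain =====

-- B replaces A's stateful while-loop (slice-membership tests and val.index scans, a
-- candidate list and a second best-tracking pass) by a subsequence automaton over val
-- (per-position next-occurrence dicts) driving a staged segmentation pass, a trim
-- helper, and final selection by Python's max(key=...).

-- ===== PORT A =====

-- span.rstrip(chars) / span.lstrip(chars): one-sided strip-by-char-set (PySem only
-- provides the two-sided stripChars); exact: drops exactly the trailing/leading
-- characters contained in `chars`.
def pvRstrip (s chars : List Char) : List Char :=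
  (s.reverse.dropWhile (fun c => chars.contains c)).reverse
def pvLstrip (s chars : List Char) : List Char :=
  s.dropWhile (fun c => chars.contains c)

-- the main while-loop of A; fuel ≥ 2*len(question)+1 suffices (each iteration
-- advances `end` except a restart, which is immediately followed by an advance);
-- returns the final (start, candidates)
def pvALoop (q v ig : List Char) : Nat → Nat → Nat → Nat → List (Nat × Nat) → Nat × List (Nat × Nat)
  | 0, start, _, _, cands => (start, cands)
  | fuel + 1, start, e, ptr, cands =>
    if he : e < q.length then
      let c := q[e]
      -- single-char `c in val[val_ptr:]` / `c in ignore_chars` is membership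
      if c ∉ v.drop ptr ∧ c ∉ ig then
        let cands' := if e > start then cands ++ [(start, e)] else cands
        if c ∈ v then
          -- start, end = end, end - 1; val_ptr = 0; end += 1
          pvALoop q v ig fuel e e 0 cands'
        else
          pvALoop q v ig fuel (e + 1) (e + 1) 0 cands'
      else if c ∈ ig then
        pvALoop q v ig fuel start (e + 1) ptr cands
      else
        -- val_ptr = val.index(question[end], val_ptr): present here, so find = index
        pvALoop q v ig fuel start (e + 1) (PySem.Chars.findFrom v [c] (ptr : Int) none).toNat cands
    else (start, cands)

-- one step of A's second loop over candidates (best_match update)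
def pvATrimStep (q ig : List Char) (best : Int × (Int × Int)) (se : Nat × Nat) : Int × (Int × Int) :=
  let span := (q.drop se.1).take (se.2 - se.1)        -- question[s:e]
  let e' : Int := (se.2 : Int) - ((span.length : Int) - ((pvRstrip span ig).length : Int))
  let s' : Int := (se.1 : Int) + ((span.length : Int) - ((pvLstrip span ig).length : Int))
  if e' - s' > best.1 then (e' - s', (s', e')) else best

def search_for_longest_substring (question : String) (val : String) (ignore_chars : String) : Int × Int :=
  let q := question.toList
  let v := val.toList
  let ig := ignore_chars.toList
  let r := pvALoop q v ig (2 * q.length + 1) 0 0 0 []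
  let cands := if q.length > r.1 then r.2 ++ [(r.1, q.length)] else r.2
  if cands.length = 0 then (0, 0)
  else (cands.foldl (pvATrimStep q ig) (0, (0, 0))).2

-- ===== PORT B =====

-- nxt[j] = {c ↦ least k ≥ j with val[k] = c}: the loop `for j in range(m-1,-1,-1):
-- nxt[j] = dict(nxt[j+1]); nxt[j][val[j]] = j`, expressed as the equivalent structural
-- recursion building the list nxt[j0..m] front-to-back
def pvBuildNxt (v : List Char) (j0 : Nat) : List (PySem.Dict Char Nat) :=
  match v with
  | [] => [PySem.Dict.empty]
  | c :: t =>
    let rest := pvBuildNxt t (j0 + 1)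
    ((rest.headD PySem.Dict.empty).insert c j0) :: rest

-- the inner `while e < n` loop of segments(): advance through the run from automaton
-- state j (nxt[j] is plain in-range indexing, hence getD)
def pvExtend (q : List Char) (nxt : List (PySem.Dict Char Nat)) (ig : PySem.Set Char) (i : Nat) (j : Nat) : Nat :=
  if h : i < q.length then
    if q[i] ∈ ig then pvExtend q nxt ig (i + 1) j
    else
      match (nxt.getD j PySem.Dict.empty).get? q[i] with
      | some j' => pvExtend q nxt ig (i + 1) j'
      | none => i
  else i
termination_by q.length - i

-- the outer `while s < n` loop of segments(), collecting the yielded pairs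
def pvSegments (q : List Char) (nxt : List (PySem.Dict Char Nat)) (ig : PySem.Set Char) (s : Nat) : List (Nat × Nat) :=
  if _h : s < q.length then
    let e := pvExtend q nxt ig s 0
    (if s < e then [(s, e)] else []) ++ pvSegments q nxt ig (max e (s + 1))
  else []
termination_by q.length - s
decreasing_by have := Nat.le_max_right (pvExtend q nxt ig s 0) (s + 1); omega

-- the two `while` loops of trimmed()
def pvTrimR (q : List Char) (ig : PySem.Set Char) (s e : Nat) : Nat :=
  if s < e ∧ q.getD (e - 1) default ∈ ig then pvTrimR q ig s (e - 1) else e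
termination_by e
decreasing_by omega

def pvTrimL (q : List Char) (ig : PySem.Set Char) (s e : Nat) : Nat :=
  if s < e ∧ q.getD s default ∈ ig then pvTrimL q ig (s + 1) e else s
termination_by e - s
decreasing_by omega

def pvBTrim (q : List Char) (ig : PySem.Set Char) (p : Nat × Nat) : Nat × Nat :=
  let e2 := pvTrimR q ig p.1 p.2
  (pvTrimL q ig p.1 e2, e2)

-- hand port of max(xs, key=key, default=dflt): first maximal element (exact: Python's
-- max keeps the earlier element on ties)
def pvPyMaxBy {α : Type} (key : α → Int) (dflt : α) : List α → α
  | [] => dflt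
  | x :: t => t.foldl (fun acc y => if key y > key acc then y else acc) x

def search_for_longest_substring_alt (question : String) (val : String) (ignore_chars : String) : Int × Int :=
  let q := question.toList
  let nxt := pvBuildNxt val.toList 0
  let ig := PySem.Set.ofList ignore_chars.toList
  let segs := (pvSegments q nxt ig 0).map (pvBTrim q ig)
  let best := pvPyMaxBy (fun p => (p.2 : Int) - (p.1 : Int)) (0, 0) segs
  if best.1 < best.2 then ((best.1 : Int), (best.2 : Int)) else (0, 0)

-- ===== PRECONDITION & SPEC =====
def Spec_search_for_longest_substring (question : String) (val : String) (ignore_chars : String) (out : Int × Int) : Prop := out = search_for_longest_substring_alt question val ignore_chars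
instance (question : String) (val : String) (ignore_chars : String) (out : Int × Int) : Decidable (Spec_search_for_longest_substring question val ignore_chars out) := by unfold Spec_search_for_longest_substring; infer_instance

-- ===== CLAIM (what is proved, stated in full; the proofs are below) =====
def Claim_equal_search_for_longest_substring : Prop := ∀ (question : String) (val : String) (ignore_chars : String), Dom_search_for_longest_substring question val ignore_chars → Spec_search_for_longest_substring question val ignore_chars (search_for_longest_substring question val ignore_chars)

-- ===== LEMMAS AND PROOFS =====

-- ---- occurrence lists: pvIdxN v c s = positions (offset by s) of c in v, ascending ----

def pvIdxN (v : List Char) (c : Char) (s : Nat) : List Nat :=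
  match v with
  | [] => []
  | x :: t => (if x = c then [s] else []) ++ pvIdxN t c (s + 1)

theorem pvIdxN_eq_nil {v : List Char} {c : Char} : ∀ {s : Nat}, pvIdxN v c s = [] ↔ c ∉ v := by
  induction v with
  | nil => simp [pvIdxN]
  | cons x t ih =>
    intro s
    by_cases hx : x = c
    · simp [pvIdxN, hx]
    · simp [pvIdxN, hx, ih, Ne.symm hx]

theorem pvIdxN_head_min {v : List Char} {c : Char} :
    ∀ {s h : Nat}, (pvIdxN v c s).head? = some h →
      ∃ k, ∃ hk : k < v.length, v[k] = c ∧ h = s + k ∧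
        ∀ i, i < k → ∀ hi : i < v.length, v[i] ≠ c := by
  induction v with
  | nil => intro s h hh; simp [pvIdxN] at hh
  | cons x t ih =>
    intro s h hh
    by_cases hx : x = c
    · simp [pvIdxN, hx] at hh
      exact ⟨0, by simp, by simpa using hx, by omega, by omega⟩
    · simp only [pvIdxN, if_neg hx, List.nil_append] at hh
      obtain ⟨k, hk, hc, hv, hmin⟩ := ih hh
      refine ⟨k + 1, by simpa using hk, by simpa using hc, by omega, ?_⟩
      intro i hi hil
      cases i with
      | zero => simpa using hx
      | succ i => simpa using hmin i (by omega) (by simpa using hil)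

-- ---- the automaton: lookup = head of the occurrence list of the suffix ----

theorem pvHeadD_eq_getD {α : Type} (l : List α) (d : α) : l.headD d = l.getD 0 d := by
  cases l <;> simp

theorem pvBuildNxt_get? (v : List Char) : ∀ (j0 k : Nat), k ≤ v.length → ∀ c,
    ((pvBuildNxt v j0).getD k PySem.Dict.empty).get? c = (pvIdxN (v.drop k) c (j0 + k)).head? := by
  induction v with
  | nil =>
    intro j0 k hk c
    have hk0 : k = 0 := by simpa using hk
    subst hk0
    simp [pvBuildNxt, pvIdxN, PySem.Dict.get?_empty]
  | cons x t ih =>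
    intro j0 k hk c
    cases k with
    | zero =>
      simp only [pvBuildNxt, List.getD_cons_zero, List.drop_zero]
      by_cases hx : x = c
      · subst hx
        simp [pvIdxN, PySem.Dict.get?_insert_self]
      · rw [PySem.Dict.get?_insert_of_ne _ _ (Ne.symm hx)]
        rw [pvHeadD_eq_getD]
        have := ih (j0 + 1) 0 (by omega) c
        simp only [List.drop_zero, Nat.add_zero] at this
        rw [this]
        simp [pvIdxN, hx]
    | succ k =>
      simp only [pvBuildNxt, List.getD_cons_succ, List.drop_succ_cons]
      rw [ih (j0 + 1) k (by simpa using hk) c]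
      congr 2
      omega

theorem pvSingleton_prefix {c : Char} {l : List Char} : [c] <+: l ↔ l.head? = some c := by
  cases l with
  | nil => simp
  | cons x t =>
    constructor
    · rintro ⟨r, hr⟩; simp at hr; simp [hr.1]
    · intro h; simp at h; exact ⟨t, by simp [h]⟩

theorem pvFindFrom_spec {v : List Char} {c : Char} {p : Nat}
    (hm : c ∈ v.drop p) :
    ∃ j : Nat, (PySem.Chars.findFrom v [c] (p : Int) none) = (j : Int) ∧
      p ≤ j ∧ ∃ hj : j < v.length, v[j] = c ∧
      ∀ i : Nat, p ≤ i → i < j → ∀ hi : i < v.length, v[i] ≠ c := by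
  have hp : p ≤ v.length := by
    by_contra h
    rw [List.drop_eq_nil_of_le (by omega)] at hm
    simp at hm
  have hne : PySem.Chars.findFrom v [c] (p : Int) none ≠ -1 := by
    rw [Ne, PySem.Chars.findFrom_natCast_eq_neg_one_iff v [c] p hp]
    simp [List.singleton_infix_iff, hm]
  obtain ⟨hle, hpre, hmin⟩ := PySem.Chars.findFrom_natCast_spec v [c] p hp hne
  set r := PySem.Chars.findFrom v [c] (p : Int) none with hr
  have h0 : 0 ≤ r := le_trans (Int.natCast_nonneg p) hle
  refine ⟨r.toNat, by omega, by omega, ?_⟩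
  rw [pvSingleton_prefix, List.head?_drop] at hpre
  have hjlen : r.toNat < v.length := by
    by_contra h
    rw [List.getElem?_eq_none (by omega)] at hpre
    simp at hpre
  refine ⟨hjlen, by rw [List.getElem?_eq_getElem hjlen] at hpre; exact Option.some.inj hpre, ?_⟩
  intro i hpi hij hi hc
  exact hmin i hpi hij (by rw [pvSingleton_prefix, List.head?_drop, List.getElem?_eq_getElem hi, hc])

theorem pvLookup_none {v : List Char} {c : Char} {p : Nat} (hp : p ≤ v.length) :
    (((pvBuildNxt v 0).getD p PySem.Dict.empty).get? c = none) ↔ c ∉ v.drop p := by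
  rw [pvBuildNxt_get? v 0 p hp c]
  simp only [Nat.zero_add]
  rw [List.head?_eq_none_iff, pvIdxN_eq_nil]

theorem pvLookup_some {v : List Char} {c : Char} {p : Nat} (hp : p ≤ v.length)
    (hm : c ∈ v.drop p) :
    ((pvBuildNxt v 0).getD p PySem.Dict.empty).get? c =
      some ((PySem.Chars.findFrom v [c] (p : Int) none).toNat) ∧
    (PySem.Chars.findFrom v [c] (p : Int) none).toNat < v.length := by
  obtain ⟨j, hjr, hpj, hjl, hjc, hjmin⟩ := pvFindFrom_spec hm
  have htn : (PySem.Chars.findFrom v [c] (p : Int) none).toNat = j := by rw [hjr]; simp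
  rw [pvBuildNxt_get? v 0 p hp c]
  simp only [Nat.zero_add]
  have hne : pvIdxN (v.drop p) c p ≠ [] := by rw [Ne, pvIdxN_eq_nil]; simpa using hm
  obtain ⟨h, hh⟩ := Option.isSome_iff_exists.1 (by
    rw [Option.isSome_iff_ne_none, Ne, List.head?_eq_none_iff]; exact hne)
  obtain ⟨k, hk, hkc, hkv, hkmin⟩ := pvIdxN_head_min hh
  have hklen : p + k < v.length := by
    have := List.length_drop (l := v) (i := p) ▸ hk
    omega
  have hvpk : v[p + k]'hklen = c := by
    rw [List.getElem_drop] at hkc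
    exact hkc
  have hhj : h = j := by
    rcases Nat.lt_trichotomy (p + k) j with hlt | heq | hgt
    · exact absurd hvpk (hjmin (p + k) (by omega) hlt hklen)
    · omega
    · -- j < p + k: j = p + (j - p) with j - p < k, contradicting k-minimality
      have hjk : j - p < k := by omega
      have hne' : (v.drop p)[j - p]'(by rw [List.length_drop]; omega) ≠ c :=
        hkmin (j - p) hjk (by rw [List.length_drop]; omega)
      rw [List.getElem_drop] at hne'
      have hpj' : p + (j - p) = j := by omega
      simp only [hpj'] at hne'
      exact absurd hjc hne'
  rw [htn, hh, hhj]
  exact ⟨rfl, hjl⟩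

-- ---- pvExtend: basic unfoldings and bounds ----

theorem pvExtend_stop (q : List Char) (nxt : List (PySem.Dict Char Nat)) (ig : PySem.Set Char)
    {i : Nat} (j : Nat) (h : ¬ i < q.length) : pvExtend q nxt ig i j = i := by
  rw [pvExtend]; simp [h]

theorem pvExtend_ig (q : List Char) (nxt : List (PySem.Dict Char Nat)) (ig : PySem.Set Char)
    {i : Nat} (j : Nat) (h : i < q.length) (hc : q[i] ∈ ig) :
    pvExtend q nxt ig i j = pvExtend q nxt ig (i + 1) j := by
  rw [pvExtend]; simp [h, hc]

theorem pvExtend_some (q : List Char) (nxt : List (PySem.Dict Char Nat)) (ig : PySem.Set Char)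
    {i : Nat} {j j' : Nat} (h : i < q.length) (hc : q[i] ∉ ig)
    (hl : (nxt.getD j PySem.Dict.empty).get? q[i] = some j') :
    pvExtend q nxt ig i j = pvExtend q nxt ig (i + 1) j' := by
  rw [pvExtend]
  simp only [dif_pos h]
  rw [if_neg hc, hl]

theorem pvExtend_none (q : List Char) (nxt : List (PySem.Dict Char Nat)) (ig : PySem.Set Char)
    {i : Nat} {j : Nat} (h : i < q.length) (hc : q[i] ∉ ig)
    (hl : (nxt.getD j PySem.Dict.empty).get? q[i] = none) :
    pvExtend q nxt ig i j = i := by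
  rw [pvExtend]
  simp only [dif_pos h]
  rw [if_neg hc, hl]

theorem pvExtend_ge (q : List Char) (nxt : List (PySem.Dict Char Nat)) (ig : PySem.Set Char) :
    ∀ n i j, q.length - i ≤ n → i ≤ pvExtend q nxt ig i j := by
  intro n
  induction n with
  | zero => intro i j h; rw [pvExtend_stop q nxt ig j (by omega)]
  | succ n ihn =>
    intro i j h
    by_cases hi : i < q.length
    · by_cases hc : q[i] ∈ ig
      · rw [pvExtend_ig q nxt ig j hi hc]
        have := ihn (i + 1) j (by omega); omega
      · cases hl : (nxt.getD j PySem.Dict.empty).get? q[i] with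
        | some j' =>
          rw [pvExtend_some q nxt ig hi hc hl]
          have := ihn (i + 1) j' (by omega); omega
        | none => rw [pvExtend_none q nxt ig hi hc hl]
    · rw [pvExtend_stop q nxt ig j hi]

theorem pvExtend_le (q : List Char) (nxt : List (PySem.Dict Char Nat)) (ig : PySem.Set Char) :
    ∀ n i j, q.length - i ≤ n → i ≤ q.length → pvExtend q nxt ig i j ≤ q.length := by
  intro n
  induction n with
  | zero => intro i j h hi; rw [pvExtend_stop q nxt ig j (by omega)]; omega
  | succ n ihn =>
    intro i j h hi
    by_cases hlt : i < q.length
    · by_cases hc : q[i] ∈ ig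
      · rw [pvExtend_ig q nxt ig j hlt hc]; exact ihn (i + 1) j (by omega) (by omega)
      · cases hl : (nxt.getD j PySem.Dict.empty).get? q[i] with
        | some j' =>
          rw [pvExtend_some q nxt ig hlt hc hl]; exact ihn (i + 1) j' (by omega) (by omega)
        | none => rw [pvExtend_none q nxt ig hlt hc hl]; omega
    · rw [pvExtend_stop q nxt ig j hlt]; omega

-- at a break position strictly inside question, the breaking char is not ignored
theorem pvExtend_break (q : List Char) (nxt : List (PySem.Dict Char Nat)) (ig : PySem.Set Char) :
    ∀ n i j, q.length - i ≤ n →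
      pvExtend q nxt ig i j < q.length → q.getD (pvExtend q nxt ig i j) default ∉ ig := by
  intro n
  induction n with
  | zero =>
    intro i j h hE
    rw [pvExtend_stop q nxt ig j (by omega)] at hE ⊢
    omega
  | succ n ihn =>
    intro i j h hE
    by_cases hi : i < q.length
    · by_cases hc : q[i] ∈ ig
      · rw [pvExtend_ig q nxt ig j hi hc] at hE ⊢; exact ihn (i + 1) j (by omega) hE
      · cases hl : (nxt.getD j PySem.Dict.empty).get? q[i] with
        | some j' =>
          rw [pvExtend_some q nxt ig hi hc hl] at hE ⊢; exact ihn (i + 1) j' (by omega) hE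
        | none =>
          rw [pvExtend_none q nxt ig hi hc hl] at hE ⊢
          rw [List.getD_eq_getElem q default hi]
          exact hc
    · rw [pvExtend_stop q nxt ig j hi] at hE; omega

-- ---- pvSegments: unfoldings and the restart view ----

theorem pvSegments_stop (q : List Char) (nxt : List (PySem.Dict Char Nat)) (ig : PySem.Set Char)
    {s : Nat} (h : ¬ s < q.length) : pvSegments q nxt ig s = [] := by
  rw [pvSegments]; simp [h]

theorem pvSegments_go (q : List Char) (nxt : List (PySem.Dict Char Nat)) (ig : PySem.Set Char)
    {s : Nat} (h : s < q.length) :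
    pvSegments q nxt ig s =
      (if s < pvExtend q nxt ig s 0 then [(s, pvExtend q nxt ig s 0)] else []) ++
        pvSegments q nxt ig (max (pvExtend q nxt ig s 0) (s + 1)) := by
  rw [pvSegments]; simp [h]

-- what remains of the segmentation after a break at position e (A's restart rule)
def pvRest (q v : List Char) (nxt : List (PySem.Dict Char Nat)) (ig : PySem.Set Char) (e : Nat) :
    List (Nat × Nat) :=
  if e < q.length then
    (if q.getD e default ∈ v then pvSegments q nxt ig e else pvSegments q nxt ig (e + 1))
  else []

theorem pvRest_eq_segments (q v : List Char) (igS : PySem.Set Char)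
    (nxt : List (PySem.Dict Char Nat)) (hnxt : nxt = pvBuildNxt v 0) (e : Nat)
    (he : e ≤ q.length) (hbrk : e < q.length → q.getD e default ∉ igS) :
    pvRest q v nxt igS e = pvSegments q nxt igS e := by
  unfold pvRest
  by_cases hlt : e < q.length
  · rw [if_pos hlt]
    by_cases hv : q.getD e default ∈ v
    · rw [if_pos hv]
    · rw [if_neg hv]
      have hgd : q.getD e default = q[e] := List.getD_eq_getElem q default hlt
      have hE : pvExtend q nxt igS e 0 = e := by
        apply pvExtend_none q nxt igS hlt (by rw [← hgd]; exact hbrk hlt)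
        rw [hnxt, pvLookup_none (by omega)]
        simp only [List.drop_zero]
        exact hgd ▸ hv
      rw [pvSegments_go q nxt igS hlt, hE]
      rw [Nat.max_eq_right (by omega : e ≤ e + 1), if_neg (by omega)]
      simp
  · rw [if_neg hlt, pvSegments_stop q nxt igS hlt]

theorem pvSegments_unfold (q v : List Char) (igS : PySem.Set Char)
    (nxt : List (PySem.Dict Char Nat)) (hnxt : nxt = pvBuildNxt v 0) (s : Nat)
    (hs : s ≤ q.length) :
    pvSegments q nxt igS s =
      (if s < pvExtend q nxt igS s 0 then [(s, pvExtend q nxt igS s 0)] else []) ++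
        pvRest q v nxt igS (pvExtend q nxt igS s 0) := by
  by_cases hlt : s < q.length
  · rw [pvSegments_go q nxt igS hlt]
    set E := pvExtend q nxt igS s 0 with hE
    have hge : s ≤ E := pvExtend_ge q nxt igS (q.length - s) s 0 le_rfl
    have hle : E ≤ q.length := pvExtend_le q nxt igS (q.length - s) s 0 le_rfl (by omega)
    rcases Nat.lt_or_ge s E with hsE | hsE
    · rw [if_pos hsE, Nat.max_eq_left (by omega)]
      congr 1
      exact (pvRest_eq_segments q v igS nxt hnxt E hle
        (fun hEl => pvExtend_break q nxt igS (q.length - s) s 0 le_rfl (hE ▸ hEl))).symm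
    · have hEs : E = s := by omega
      rw [if_neg (by omega), Nat.max_eq_right (by omega), hEs]
      simp only [List.nil_append]
      -- E = s: the very first char breaks, so q[s] ∉ ig and q[s] ∉ v
      have hgd : q.getD s default = q[s] := List.getD_eq_getElem q default hlt
      have hcig : q[s] ∉ igS := by
        by_contra hcig
        have := pvExtend_ig q nxt igS 0 hlt hcig
        rw [← hE, hEs] at this
        have := pvExtend_ge q nxt igS (q.length - (s + 1)) (s + 1) 0 le_rfl
        omega
      have hcv : q[s] ∉ v := by
        by_contra hcv
        cases hl : (nxt.getD 0 PySem.Dict.empty).get? q[s] with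
        | some j' =>
          have := pvExtend_some q nxt igS hlt hcig hl
          rw [← hE, hEs] at this
          have := pvExtend_ge q nxt igS (q.length - (s + 1)) (s + 1) j' le_rfl
          omega
        | none =>
          rw [hnxt, pvLookup_none (by omega)] at hl
          simp at hl
          exact hl hcv
      unfold pvRest
      rw [if_pos hlt, if_neg (by rw [hgd]; exact hcv)]
  · have hs' : s = q.length := by omega
    rw [pvSegments_stop q nxt igS hlt]
    rw [pvExtend_stop q nxt igS 0 hlt, if_neg (by omega)]
    unfold pvRest
    rw [if_neg hlt]
    simp

-- candidates accumulate on the right in A's loop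
theorem pvALoop_cands (q v ig : List Char) :
    ∀ (fuel : Nat) start e ptr cands,
      pvALoop q v ig fuel start e ptr cands =
        ((pvALoop q v ig fuel start e ptr []).1,
          cands ++ (pvALoop q v ig fuel start e ptr []).2) := by
  intro fuel
  induction fuel with
  | zero => intro start e ptr cands; simp [pvALoop]
  | succ fuel ih =>
    intro start e ptr cands
    rw [pvALoop, pvALoop]
    by_cases he : e < q.length
    · simp only [dif_pos he]
      split
      · split
        · by_cases hgt : e > start
          · simp only [if_pos hgt]
            rw [ih _ _ _ (cands ++ [(start, e)]), ih _ _ _ ([] ++ [(start, e)])]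
            simp
          · simp only [if_neg hgt]
            rw [ih _ _ _ cands]
        · by_cases hgt : e > start
          · simp only [if_pos hgt]
            rw [ih _ _ _ (cands ++ [(start, e)]), ih _ _ _ ([] ++ [(start, e)])]
            simp
          · simp only [if_neg hgt]
            rw [ih _ _ _ cands]
      · split
        · rw [ih _ _ _ cands]
        · rw [ih _ _ _ cands]
    · simp [dif_neg he]

-- ---- the main simulation: A's loop = extend + restart view of B's segmentation ----

-- A's final candidate append (the `if end > start` after the loop)
def pvAFin (q : List Char) (r : Nat × List (Nat × Nat)) : List (Nat × Nat) :=
  if q.length > r.1 then r.2 ++ [(r.1, q.length)] else r.2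

theorem pvAFin_append (q : List Char) (r : Nat × List (Nat × Nat)) (extra : List (Nat × Nat)) :
    pvAFin q (r.1, extra ++ r.2) = extra ++ pvAFin q r := by
  by_cases h : q.length > r.1 <;> simp [pvAFin, h]

theorem pvMain (q v igl : List Char) (igS : PySem.Set Char) (hig : igS = PySem.Set.ofList igl)
    (nxt : List (PySem.Dict Char Nat)) (hnxt : nxt = pvBuildNxt v 0) :
    ∀ fuel e start ptr, e ≤ q.length → start ≤ e → ptr ≤ v.length → 2 * (q.length - e) < fuel →
      pvAFin q (pvALoop q v igl fuel start e ptr []) =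
      (if start < pvExtend q nxt igS e ptr then [(start, pvExtend q nxt igS e ptr)] else []) ++
        pvRest q v nxt igS (pvExtend q nxt igS e ptr) := by
  intro fuel
  induction fuel using Nat.strong_induction_on with
  | _ fuel ih =>
    intro e start ptr he hse hptr hfuel
    obtain ⟨f, rfl⟩ : ∃ f, fuel = f + 1 := ⟨fuel - 1, by omega⟩
    rw [pvALoop]
    by_cases he' : e < q.length
    · simp only [dif_pos he']
      have higmem : ∀ c : Char, (c ∈ igS) ↔ c ∈ igl := by
        intro c; rw [hig]; exact PySem.Set.mem_ofList igl c
      by_cases hcig : q[e] ∈ igl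
      · -- ignored char: both sides skip it
        have hA : ¬ (q[e] ∉ v.drop ptr ∧ q[e] ∉ igl) := fun h => h.2 hcig
        rw [if_neg hA, if_pos hcig]
        rw [pvExtend_ig q nxt igS ptr he' ((higmem _).2 hcig)]
        exact ih f (by omega) (e + 1) start ptr (by omega) (by omega) hptr (by omega)
      · by_cases hcd : q[e] ∈ v.drop ptr
        · -- c extends the run
          have hA : ¬ (q[e] ∉ v.drop ptr ∧ q[e] ∉ igl) := fun h => h.1 hcd
          rw [if_neg hA, if_neg hcig]
          obtain ⟨hl, hlt⟩ := hnxt ▸ pvLookup_some hptr hcd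
          rw [pvExtend_some q nxt igS he' (fun hc => hcig ((higmem _).1 hc)) hl]
          exact ih f (by omega) (e + 1) start _ (by omega) (by omega) (by omega) (by omega)
        · -- break at e
          rw [if_pos ⟨hcd, hcig⟩]
          have hE : pvExtend q nxt igS e ptr = e :=
            pvExtend_none q nxt igS he' (fun hc => hcig ((higmem _).1 hc))
              (by rw [hnxt, pvLookup_none hptr]; exact hcd)
          rw [hE]
          have hgd : q.getD e default = q[e] := List.getD_eq_getElem q default he'
          by_cases hcv : q[e] ∈ v
          · -- restart at e: A re-reads q[e] with val_ptr = 0 in the next iteration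
            rw [if_pos hcv]
            obtain ⟨f', rfl⟩ : ∃ f', f = f' + 1 := ⟨f - 1, by omega⟩
            rw [pvALoop]
            simp only [dif_pos he']
            have hcd0 : q[e] ∈ v.drop 0 := by simpa using hcv
            have hA2 : ¬ (q[e] ∉ v.drop 0 ∧ q[e] ∉ igl) := fun h => h.1 hcd0
            rw [if_neg hA2, if_neg hcig]
            obtain ⟨hl0, hlt0⟩ := hnxt ▸ pvLookup_some (by omega) hcd0
            set ptr2 := (PySem.Chars.findFrom v [q[e]] ((0 : Nat) : Int) none).toNat with hptr2
            set cands' := (if e > start then ([] : List (Nat × Nat)) ++ [(start, e)] else []) with hcands'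
            rw [pvALoop_cands q v igl f' e (e + 1) ptr2 cands']
            rw [pvAFin_append q (pvALoop q v igl f' e (e + 1) ptr2 []) cands']
            have key := ih f' (by omega) (e + 1) e ptr2 (by omega) (by omega) (by omega) (by omega)
            rw [key]
            -- B side: pvRest e takes the q[e] ∈ v branch = pvSegments e, which unfolds
            -- through the same extend step
            have hrest : pvRest q v nxt igS e = pvSegments q nxt igS e := by
              unfold pvRest
              rw [if_pos he', if_pos (by rw [hgd]; exact hcv)]
            have hseg : pvSegments q nxt igS e =
                (if e < pvExtend q nxt igS (e + 1) ptr2 then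
                  [(e, pvExtend q nxt igS (e + 1) ptr2)] else []) ++
                  pvRest q v nxt igS (pvExtend q nxt igS (e + 1) ptr2) := by
              have h0 : pvExtend q nxt igS e 0 = pvExtend q nxt igS (e + 1) ptr2 := by
                apply pvExtend_some q nxt igS he' (fun hc => hcig ((higmem _).1 hc))
                exact_mod_cast hl0
              rw [pvSegments_unfold q v igS nxt hnxt e (by omega), h0]
            rw [hrest, hseg]
            have hgeE := pvExtend_ge q nxt igS (q.length - (e + 1)) (e + 1) ptr2 le_rfl
            rw [if_pos (by omega)]
            by_cases hgt : e > start
            · rw [hcands', if_pos hgt, if_pos (show start < e from hgt)]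
              simp
            · rw [hcands', if_neg hgt, if_neg (show ¬ start < e by omega)]
          · -- q[e] not in val at all: restart past e
            rw [if_neg hcv]
            set cands' := (if e > start then ([] : List (Nat × Nat)) ++ [(start, e)] else []) with hcands'
            rw [pvALoop_cands q v igl f (e + 1) (e + 1) 0 cands']
            rw [pvAFin_append q (pvALoop q v igl f (e + 1) (e + 1) 0 []) cands']
            have key := ih f (by omega) (e + 1) (e + 1) 0 (by omega) (by omega) (by omega) (by omega)
            rw [key]
            have hrest : pvRest q v nxt igS e = pvSegments q nxt igS (e + 1) := by
              unfold pvRest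
              rw [if_pos he', if_neg (by rw [hgd]; exact hcv)]
            have hseg : pvSegments q nxt igS (e + 1) =
                (if e + 1 < pvExtend q nxt igS (e + 1) 0 then
                  [(e + 1, pvExtend q nxt igS (e + 1) 0)] else []) ++
                  pvRest q v nxt igS (pvExtend q nxt igS (e + 1) 0) :=
              pvSegments_unfold q v igS nxt hnxt (e + 1) (by omega)
            rw [hrest, hseg]
            by_cases hgt : e > start
            · rw [hcands', if_pos hgt, if_pos (show start < e from hgt)]
              simp
            · rw [hcands', if_neg hgt, if_neg (show ¬ start < e by omega)]
    · -- end of question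
      simp only [dif_neg he']
      have hee : e = q.length := by omega
      subst hee
      rw [pvExtend_stop q nxt igS ptr he']
      by_cases hgt : start < q.length
      · simp [pvAFin, pvRest, hgt]
      · simp [pvAFin, pvRest, hgt]

-- ---- bounds on segments and trims ----

theorem pvSegments_bounds (q : List Char) (nxt : List (PySem.Dict Char Nat)) (ig : PySem.Set Char) :
    ∀ n s, q.length - s ≤ n → ∀ p ∈ pvSegments q nxt ig s, p.1 ≤ p.2 ∧ p.2 ≤ q.length := by
  intro n
  induction n with
  | zero =>
    intro s h p hp
    rw [pvSegments_stop q nxt ig (by omega)] at hp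
    simp at hp
  | succ n ihn =>
    intro s h p hp
    by_cases hlt : s < q.length
    · rw [pvSegments_go q nxt ig hlt] at hp
      rcases List.mem_append.1 hp with hp1 | hp2
      · by_cases hsE : s < pvExtend q nxt ig s 0
        · rw [if_pos hsE] at hp1
          simp at hp1
          subst hp1
          exact ⟨by simpa using Nat.le_of_lt hsE,
            pvExtend_le q nxt ig (q.length - s) s 0 le_rfl (by omega)⟩
        · rw [if_neg hsE] at hp1; simp at hp1
      · have hmax := Nat.le_max_right (pvExtend q nxt ig s 0) (s + 1)
        exact ihn (max (pvExtend q nxt ig s 0) (s + 1)) (by omega) p hp2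
    · rw [pvSegments_stop q nxt ig hlt] at hp; simp at hp

theorem pvTrimR_ge (q : List Char) (ig : PySem.Set Char) :
    ∀ e s, s ≤ e → s ≤ pvTrimR q ig s e := by
  intro e
  induction e using Nat.strong_induction_on with
  | _ e ihe =>
    intro s hse
    rw [pvTrimR]
    split
    · next hc => exact ihe (e - 1) (by omega) s (by omega)
    · omega

theorem pvTrimL_le (q : List Char) (ig : PySem.Set Char) :
    ∀ e s, s ≤ e → pvTrimL q ig s e ≤ e := by
  intro e
  suffices h : ∀ n s, e - s ≤ n → s ≤ e → pvTrimL q ig s e ≤ e by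
    intro s hse; exact h (e - s) s le_rfl hse
  intro n
  induction n with
  | zero =>
    intro s h hse
    rw [pvTrimL]
    split
    · next hc => omega
    · omega
  | succ n ihn =>
    intro s h hse
    rw [pvTrimL]
    split
    · next hc => exact ihn (s + 1) (by omega) (by omega)
    · omega

theorem pvBTrim_le (q : List Char) (ig : PySem.Set Char) (p : Nat × Nat) (h : p.1 ≤ p.2) :
    (pvBTrim q ig p).1 ≤ (pvBTrim q ig p).2 := by
  unfold pvBTrim
  exact pvTrimL_le q ig _ _ (pvTrimR_ge q ig _ _ h)

-- ---- A's trim step = trim helper + first-max update ----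

def pvConsider (q : List Char) (ig : PySem.Set Char) (s e : Nat) (bl : Int) (best : Int × Int) : Int × (Int × Int) :=
  let e2 := pvTrimR q ig s e
  let s2 := pvTrimL q ig s e2
  if (e2 : Int) - (s2 : Int) > bl then ((e2 : Int) - (s2 : Int), ((s2 : Int), (e2 : Int))) else (bl, best)

def pvH (acc : Int × (Int × Int)) (p : Nat × Nat) : Int × (Int × Int) :=
  if (p.2 : Int) - (p.1 : Int) > acc.1 then ((p.2 : Int) - (p.1 : Int), ((p.1 : Int), (p.2 : Int))) else acc

theorem pvConsider_eq_H (q : List Char) (ig : PySem.Set Char) (s e : Nat) (acc : Int × (Int × Int)) :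
    pvConsider q ig s e acc.1 acc.2 = pvH acc (pvBTrim q ig (s, e)) := by
  unfold pvConsider pvH pvBTrim
  dsimp only

theorem pvH_nonneg {acc : Int × (Int × Int)} (hacc : 0 ≤ acc.1) (p : Nat × Nat) :
    0 ≤ (pvH acc p).1 := by
  unfold pvH
  split
  · dsimp only; omega
  · exact hacc

theorem pvTakeWhile_len_le {α : Type} (p : α → Bool) (l : List α) :
    (l.takeWhile p).length ≤ l.length := by
  induction l with
  | nil => simp
  | cons x t ih => rw [List.takeWhile_cons]; split <;> simp <;> omega

theorem pvSpan_snoc (q : List Char) (s e : Nat) (hse : s < e) (hel : e ≤ q.length) :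
    (q.drop s).take (e - s) = (q.drop s).take (e - 1 - s) ++ [q[e - 1]'(by omega)] := by
  have h1 : e - s = (e - 1 - s) + 1 := by omega
  rw [h1, List.take_succ]
  congr 1
  rw [List.getElem?_drop]
  rw [List.getElem?_eq_getElem (by omega)]
  simp only [Option.toList_some]
  congr 2
  omega

theorem pvSpan_cons (q : List Char) (s e : Nat) (hse : s < e) (hel : e ≤ q.length) :
    (q.drop s).take (e - s) = q[s]'(by omega) :: (q.drop (s+1)).take (e - (s+1)) := by
  rw [List.drop_eq_getElem_cons (by omega)]
  have h1 : e - s = (e - (s+1)) + 1 := by omega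
  rw [h1, List.take_succ_cons]

theorem pvTrimR_eq (q : List Char) (igS : PySem.Set Char) (pB : Char → Bool)
    (hp : ∀ c, pB c = decide (c ∈ igS)) :
    ∀ e s, s ≤ e → e ≤ q.length →
      pvTrimR q igS s e = e - (((q.drop s).take (e - s)).reverse.takeWhile pB).length := by
  intro e
  induction e using Nat.strong_induction_on with
  | _ e ih =>
    intro s hse hel
    rw [pvTrimR]
    by_cases hlt : s < e
    · have hgetD : q.getD (e-1) default = q[e-1]'(by omega) := List.getD_eq_getElem q default (by omega)
      rw [pvSpan_snoc q s e hlt hel]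
      simp only [List.reverse_append, List.reverse_singleton, List.singleton_append,
        List.takeWhile_cons]
      by_cases hmem : q[e-1]'(by omega) ∈ igS
      · have hb : pB (q[e-1]'(by omega)) = true := by rw [hp]; simpa
        rw [if_pos ⟨hlt, by rw [hgetD]; exact hmem⟩]
        rw [ih (e-1) (by omega) s (by omega) (by omega), hb]
        simp only [if_true, List.length_cons]
        have hle : ((((q.drop s).take (e - 1 - s)).reverse).takeWhile pB).length ≤ e - 1 - s := by
          calc _ ≤ (((q.drop s).take (e - 1 - s)).reverse).length := pvTakeWhile_len_le _ _
            _ ≤ e - 1 - s := by simp [List.length_take]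
        omega
      · have hb : pB (q[e-1]'(by omega)) = false := by rw [hp]; simpa
        rw [if_neg (by rw [hgetD]; tauto), hb]
        simp
    · rw [if_neg (by tauto)]
      have : e - s = 0 := by omega
      simp [this]

theorem pvTrimL_eq (q : List Char) (igS : PySem.Set Char) (pB : Char → Bool)
    (hp : ∀ c, pB c = decide (c ∈ igS)) :
    ∀ e s, s ≤ e → e ≤ q.length →
      pvTrimL q igS s e = s + (((q.drop s).take (e - s)).takeWhile pB).length := by
  intro e
  suffices h : ∀ n s, e - s = n → s ≤ e → e ≤ q.length →
      pvTrimL q igS s e = s + (((q.drop s).take (e - s)).takeWhile pB).length by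
    intro s hse hel
    exact h (e - s) s rfl hse hel
  intro n
  induction n with
  | zero =>
    intro s hn hse hel
    rw [pvTrimL, if_neg (by omega), hn]
    simp
  | succ n ihn =>
    intro s hn hse hel
    have hlt : s < e := by omega
    have hgetD : q.getD s default = q[s]'(by omega) := List.getD_eq_getElem q default (by omega)
    rw [pvTrimL, pvSpan_cons q s e hlt hel, List.takeWhile_cons]
    by_cases hmem : q[s]'(by omega) ∈ igS
    · have hb : pB (q[s]'(by omega)) = true := by rw [hp]; simpa
      rw [if_pos ⟨hlt, by rw [hgetD]; exact hmem⟩, hb]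
      rw [ihn (s+1) (by omega) (by omega) hel]
      simp only [if_true, List.length_cons]
      omega
    · have hb : pB (q[s]'(by omega)) = false := by rw [hp]; simpa
      rw [if_neg (by rw [hgetD]; tauto), hb]
      simp

theorem pvTakeWhile_append_of_exists {α : Type} (p : α → Bool) (l1 l2 : List α)
    (h : ∃ x ∈ l1, ¬ p x) : (l1 ++ l2).takeWhile p = l1.takeWhile p := by
  induction l1 with
  | nil => simp at h
  | cons x t ih =>
    simp only [List.cons_append, List.takeWhile_cons]
    by_cases hx : p x
    · simp only [hx, if_true]
      obtain ⟨y, hy, hpy⟩ := h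
      rcases List.mem_cons.1 hy with rfl | hyt
      · exact absurd hx hpy
      · rw [ih ⟨y, hyt, hpy⟩]
    · simp [hx]

theorem pvDropWhile_len {α : Type} (p : α → Bool) (l : List α) :
    (l.dropWhile p).length = l.length - (l.takeWhile p).length := by
  have h := congrArg List.length (List.takeWhile_append_dropWhile (p := p) (l := l))
  simp only [List.length_append] at h
  omega

theorem pvTrim_eq_consider {q igl : List Char} {igS : PySem.Set Char}
    (hig : igS = PySem.Set.ofList igl) {s e : Nat} (hse : s ≤ e) (hel : e ≤ q.length)
    {acc : Int × (Int × Int)} (hacc : 0 ≤ acc.1) :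
    pvATrimStep q igl acc (s, e) = pvConsider q igS s e acc.1 acc.2 := by
  have hp : ∀ c, (fun c => igl.contains c) c = decide (c ∈ igS) := by
    intro c
    simp [hig, List.contains_iff_mem, PySem.Set.mem_ofList]
  set pB : Char → Bool := fun c => igl.contains c with hpB
  set span := (q.drop s).take (e - s) with hspan
  have hlen : span.length = e - s := by
    rw [hspan, List.length_take, List.length_drop]; omega
  set trail := (span.reverse.takeWhile pB).length with htrail
  set lead := (span.takeWhile pB).length with hlead
  have htrail_le : trail ≤ e - s := by
    rw [htrail]
    calc _ ≤ span.reverse.length := pvTakeWhile_len_le _ _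
      _ = e - s := by simp [hlen]
  have hlead_le : lead ≤ e - s := by
    rw [hlead]
    calc _ ≤ span.length := pvTakeWhile_len_le _ _
      _ = e - s := hlen
  have hrlen : (pvRstrip span igl).length = (e - s) - trail := by
    rw [pvRstrip, List.length_reverse, pvDropWhile_len, List.length_reverse, hlen, ← hpB, ← htrail]
  have hllen : (pvLstrip span igl).length = (e - s) - lead := by
    rw [pvLstrip, pvDropWhile_len, hlen, ← hpB, ← hlead]
  have he2 : pvTrimR q igS s e = e - trail := by
    rw [pvTrimR_eq q igS pB hp e s hse hel, ← hspan, ← htrail]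
  unfold pvATrimStep pvConsider
  dsimp only
  rw [← hspan, hrlen, hllen, hlen, he2]
  by_cases hall : trail = e - s
  · -- the whole span consists of ignore characters
    have hlead_all : lead = e - s := by
      have hdw : span.reverse.dropWhile pB = [] := by
        have := pvDropWhile_len pB span.reverse
        rw [List.length_reverse, hlen, ← htrail, hall] at this
        exact List.eq_nil_of_length_eq_zero (by omega)
      have hallmem : ∀ x ∈ span, pB x = true := by
        intro x hx
        exact List.dropWhile_eq_nil_iff.1 hdw x (by simpa using hx)
      rw [hlead, List.takeWhile_eq_self_iff.2 hallmem, hlen]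
    have hs2 : pvTrimL q igS s (e - trail) = s := by
      rw [pvTrimL_eq q igS pB hp (e - trail) s (by omega) (by omega)]
      have h0 : e - trail - s = 0 := by omega
      rw [h0]
      simp
    rw [hs2, hall, hlead_all]
    rw [if_neg (by push_cast; omega), if_neg (by push_cast; omega)]
  · -- a non-ignored character remains: both sides trim to the same span
    have htlt : trail < e - s := by omega
    have hne : (span.reverse.dropWhile pB) ≠ [] := by
      intro h
      have := pvDropWhile_len pB span.reverse
      rw [h] at this
      simp [hlen, ← htrail] at this
      omega
    have hs2 : pvTrimL q igS s (e - trail) = s + lead := by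
      rw [pvTrimL_eq q igS pB hp (e - trail) s (by omega) (by omega)]
      congr 1
      rw [hlead]
      have hdec : span = (span.reverse.dropWhile pB).reverse ++ (span.reverse.takeWhile pB).reverse := by
        have h := congrArg List.reverse (List.takeWhile_append_dropWhile (p := pB) (l := span.reverse))
        rw [List.reverse_append, List.reverse_reverse] at h
        exact h.symm
      set pre := (span.reverse.dropWhile pB).reverse with hpre
      have hprelen : pre.length = (e - s) - trail := by
        rw [hpre, List.length_reverse, pvDropWhile_len, List.length_reverse, hlen, ← htrail]
      have hpre_span : (q.drop (s)).take (e - trail - s) = pre := by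
        have h1 : (q.drop s).take (e - trail - s) = span.take ((e - s) - trail) := by
          rw [hspan, List.take_take]
          congr 1
          omega
        rw [h1, hdec, List.take_append_of_le_length (by rw [hprelen]), List.take_of_length_le (le_of_eq hprelen)]
      have hfail : ∃ x ∈ pre, ¬ pB x = true := by
        refine ⟨(span.reverse.dropWhile pB).head hne, by
          rw [hpre]
          exact List.mem_reverse.2 (List.head_mem hne), by
          simp [List.head_dropWhile_not pB hne]⟩
      rw [hpre_span]
      conv_rhs => rw [hdec]
      rw [pvTakeWhile_append_of_exists pB _ _ hfail]
    rw [hs2]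
    have hcast : ((e - trail : Nat) : Int) = (e : Int) - (trail : Int) := by push_cast; omega
    have hcast2 : ((s + lead : Nat) : Int) = (s : Int) + (lead : Int) := by push_cast; ring
    rw [hcast, hcast2]
    have g1 : ((e - s : Nat) : Int) - ((e - s - trail : Nat) : Int) = (trail : Int) := by omega
    have g2 : ((e - s : Nat) : Int) - ((e - s - lead : Nat) : Int) = (lead : Int) := by omega
    rw [g1, g2]

-- A's candidate fold = pvH fold over the trimmed pairs
theorem pvFold_eq (q igl : List Char) (igS : PySem.Set Char) (hig : igS = PySem.Set.ofList igl) :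
    ∀ (cs : List (Nat × Nat)) (acc : Int × (Int × Int)), 0 ≤ acc.1 →
      (∀ p ∈ cs, p.1 ≤ p.2 ∧ p.2 ≤ q.length) →
      cs.foldl (pvATrimStep q igl) acc = (cs.map (pvBTrim q igS)).foldl pvH acc := by
  intro cs
  induction cs with
  | nil => intro acc _ _; simp
  | cons p t ih =>
    intro acc hacc hb
    obtain ⟨s, e⟩ := p
    have hp := hb (s, e) (by simp)
    simp only [List.map_cons, List.foldl_cons]
    rw [pvTrim_eq_consider hig hp.1 hp.2 hacc, pvConsider_eq_H]
    exact ih (pvH acc (pvBTrim q igS (s, e))) (pvH_nonneg hacc _)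
      (fun p hp => hb p (by simp [hp]))

-- pvH fold = Python max(key=..., default=...) + the positive-length guard
theorem pvMax_aux :
    ∀ (t : List (Nat × Nat)) (x : Nat × Nat) (a : Int × (Int × Int)),
      (∀ p ∈ t, p.1 ≤ p.2) → x.1 ≤ x.2 →
      a.1 = (x.2 : Int) - (x.1 : Int) →
      a.2 = (if x.1 < x.2 then ((x.1 : Int), (x.2 : Int)) else (0, 0)) →
      (t.foldl pvH a).1 =
        ((t.foldl (fun acc y => if ((y.2 : Int) - (y.1 : Int)) > ((acc.2 : Int) - (acc.1 : Int)) then y else acc) x).2 : Int) -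
        ((t.foldl (fun acc y => if ((y.2 : Int) - (y.1 : Int)) > ((acc.2 : Int) - (acc.1 : Int)) then y else acc) x).1 : Int) ∧
      (t.foldl pvH a).2 =
        (let rx := t.foldl (fun acc y => if ((y.2 : Int) - (y.1 : Int)) > ((acc.2 : Int) - (acc.1 : Int)) then y else acc) x;
         if rx.1 < rx.2 then ((rx.1 : Int), (rx.2 : Int)) else (0, 0)) ∧
      (t.foldl (fun acc y => if ((y.2 : Int) - (y.1 : Int)) > ((acc.2 : Int) - (acc.1 : Int)) then y else acc) x).1 ≤
      (t.foldl (fun acc y => if ((y.2 : Int) - (y.1 : Int)) > ((acc.2 : Int) - (acc.1 : Int)) then y else acc) x).2 := by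
  intro t
  induction t with
  | nil =>
    intro x a _ hx h1 h2
    exact ⟨h1, h2, hx⟩
  | cons y t ih =>
    intro x a hb hx h1 h2
    have hy := hb y (by simp)
    simp only [List.foldl_cons]
    by_cases hcond : ((y.2 : Int) - (y.1 : Int)) > ((x.2 : Int) - (x.1 : Int))
    · rw [if_pos hcond]
      have hHcond : ((y.2 : Int) - (y.1 : Int)) > a.1 := by rw [h1]; exact hcond
      have hstep : pvH a y = (((y.2 : Int) - (y.1 : Int)), ((y.1 : Int), (y.2 : Int))) := by
        unfold pvH; rw [if_pos hHcond]
      rw [hstep]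
      apply ih y _ (fun p hp => hb p (by simp [hp])) hy
      · rfl
      · have hy12 : y.1 < y.2 := by omega
        simp [hy12]
    · rw [if_neg hcond]
      have hHcond : ¬ ((y.2 : Int) - (y.1 : Int)) > a.1 := by rw [h1]; exact hcond
      have hstep : pvH a y = a := by unfold pvH; rw [if_neg hHcond]
      rw [hstep]
      exact ih x a (fun p hp => hb p (by simp [hp])) hx h1 h2

theorem pvMax_eq (ts : List (Nat × Nat)) (hb : ∀ p ∈ ts, p.1 ≤ p.2) :
    (ts.foldl pvH ((0 : Int), ((0 : Int), (0 : Int)))).2 =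
      (let best := pvPyMaxBy (fun p => (p.2 : Int) - (p.1 : Int)) ((0 : Nat), (0 : Nat)) ts;
       if best.1 < best.2 then ((best.1 : Int), (best.2 : Int)) else ((0 : Int), (0 : Int))) := by
  cases ts with
  | nil => simp [pvPyMaxBy]
  | cons x t =>
    have hx := hb x (by simp)
    simp only [List.foldl_cons, pvPyMaxBy]
    have ha := pvMax_aux t x (pvH (0, ((0 : Int), (0 : Int))) x)
      (fun p hp => hb p (by simp [hp])) hx ?_ ?_
    · exact ha.2.1
    · unfold pvH
      dsimp only
      by_cases hxy : x.1 < x.2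
      · rw [if_pos (by push_cast; omega)]
      · rw [if_neg (by push_cast; omega)]
        omega
    · unfold pvH
      dsimp only
      by_cases hxy : x.1 < x.2
      · rw [if_pos (by push_cast; omega), if_pos hxy]
      · rw [if_neg (by push_cast; omega), if_neg hxy]

-- ===== VERDICT (by name: the statement is the Claim_ definition above) =====
theorem search_for_longest_substring_spec : Claim_equal_search_for_longest_substring := by
  intro question val ignore_chars _
  unfold Spec_search_for_longest_substring
  unfold search_for_longest_substring search_for_longest_substring_alt
  dsimp only
  set q := question.toList
  set v := val.toList
  set igl := ignore_chars.toList
  set igS := PySem.Set.ofList igl with higS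
  set nxt := pvBuildNxt v 0 with hnxt
  have hcands := pvMain q v igl igS higS nxt hnxt (2 * q.length + 1) 0 0 0
    (by omega) (by omega) (by omega) (by omega)
  unfold pvAFin at hcands
  have hseg0 := pvSegments_unfold q v igS nxt hnxt 0 (by omega)
  have hc : (if q.length > (pvALoop q v igl (2 * q.length + 1) 0 0 0 []).1 then
      (pvALoop q v igl (2 * q.length + 1) 0 0 0 []).2 ++
        [((pvALoop q v igl (2 * q.length + 1) 0 0 0 []).1, q.length)]
      else (pvALoop q v igl (2 * q.length + 1) 0 0 0 []).2) = pvSegments q nxt igS 0 := by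
    rw [hcands, hseg0]
  rw [hc]
  set cs := pvSegments q nxt igS 0 with hcs
  have hbnd : ∀ p ∈ cs, p.1 ≤ p.2 ∧ p.2 ≤ q.length :=
    pvSegments_bounds q nxt igS q.length 0 (by omega)
  have hfold : (cs.foldl (pvATrimStep q igl) (0, (0, 0))).2 =
      (let best := pvPyMaxBy (fun p => (p.2 : Int) - (p.1 : Int)) ((0 : Nat), (0 : Nat))
        (cs.map (pvBTrim q igS));
       if best.1 < best.2 then ((best.1 : Int), (best.2 : Int)) else ((0 : Int), (0 : Int))) := by
    rw [pvFold_eq q igl igS higS cs (0, (0, 0)) (by norm_num) hbnd]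
    apply pvMax_eq
    intro p hp
    obtain ⟨p0, hp0, rfl⟩ := List.mem_map.1 hp
    exact pvBTrim_le q igS p0 (hbnd p0 hp0).1
  by_cases hemp : cs.length = 0
  · rw [if_pos hemp]
    rw [List.eq_nil_of_length_eq_zero hemp] at hfold ⊢
    simpa [pvPyMaxBy] using hfold.symm
  · rw [if_neg hemp]
    exact hfold
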